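-- pv_equiv track=rewrite | github.com/maxnoller/haha_analyser | haha.py | count_categorize_lines
-- ===== SOURCE A (Python) =====
-- def count_categorize_lines(lines):
--     nrof_haha = 0
--     nrof_xd = 0
--     nrof_normal = 0
--     for line in lines:
--         if line.endswith("xD\n") or line.endswith("xd\n"):
--             nrof_xd+=1
--         elif(line.endswith("haha\n")):
--             nrof_haha+=1
--         else:
--             nrof_normal+=1
--     return nrof_haha, nrof_xd, nrof_normal
-- ===== SOURCE B (Python) =====
-- def count_categorize_lines(lines):
--     lines = list(lines)
--     nrof_xd = sum(1 for l in lines if l.endswith(("xD\n", "xd\n")))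
--     nrof_haha = sum(1 for l in lines if l.endswith("haha\n"))
--     return nrof_haha, nrof_xd, len(lines) - nrof_xd - nrof_haha
-- ===== Notes on version B (the rewrite author's own statement) =====
-- stated objective: alternative
-- what changed: Replaced the single priority-branched loop over a 3-counter state with two independent filtered sums plus a length complement for the third category (valid because the haha and xD/xd suffix categories are disjoint).
import Mathlib
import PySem

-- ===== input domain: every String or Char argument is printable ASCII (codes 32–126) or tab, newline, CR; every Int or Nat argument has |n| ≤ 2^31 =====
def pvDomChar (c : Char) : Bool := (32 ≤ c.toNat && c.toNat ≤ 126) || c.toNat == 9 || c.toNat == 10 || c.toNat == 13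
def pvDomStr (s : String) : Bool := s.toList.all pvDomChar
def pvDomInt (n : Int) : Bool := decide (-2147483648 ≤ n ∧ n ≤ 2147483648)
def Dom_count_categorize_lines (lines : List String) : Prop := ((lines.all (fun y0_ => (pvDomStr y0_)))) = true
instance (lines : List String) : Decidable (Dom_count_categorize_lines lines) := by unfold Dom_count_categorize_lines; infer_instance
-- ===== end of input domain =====

-- B replaces A's single priority-branched loop over three counters with two independent
-- filtered counts plus a length complement (same values; objective: alternative decomposition).

-- ===== PORT A =====
-- one pass, state (nrof_haha, nrof_xd, nrof_normal), branch priority xd > haha > normal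
def countCatStep (st : Int × Int × Int) (line : String) : Int × Int × Int :=
  if PySem.Str.endswith line "xD\n" || PySem.Str.endswith line "xd\n" then
    (st.1, st.2.1 + 1, st.2.2)
  else if PySem.Str.endswith line "haha\n" then
    (st.1 + 1, st.2.1, st.2.2)
  else
    (st.1, st.2.1, st.2.2 + 1)

def count_categorize_lines (lines : List String) : Int × Int × Int :=
  lines.foldl countCatStep (0, 0, 0)

-- ===== PORT B =====
-- two filtered counts, third category by complement
def count_categorize_lines_alt (lines : List String) : Int × Int × Int :=
  let nrof_xd : Int := lines.countP (fun l => PySem.Str.endswith l "xD\n" || PySem.Str.endswith l "xd\n")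
  let nrof_haha : Int := lines.countP (fun l => PySem.Str.endswith l "haha\n")
  (nrof_haha, nrof_xd, (lines.length : Int) - nrof_xd - nrof_haha)

-- ===== PRECONDITION & SPEC =====
def Spec_count_categorize_lines (lines : List String) (out : Int × Int × Int) : Prop := out = count_categorize_lines_alt lines
instance (lines : List String) (out : Int × Int × Int) : Decidable (Spec_count_categorize_lines lines out) := by unfold Spec_count_categorize_lines; infer_instance

-- ===== CLAIM (what is proved, stated in full; the proofs are below) =====
def Claim_equal_count_categorize_lines : Prop := ∀ (lines : List String), Dom_count_categorize_lines lines → Spec_count_categorize_lines lines (count_categorize_lines lines)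

-- ===== LEMMAS AND PROOFS =====

-- a line ending with "haha\n" cannot also end with "xD\n" or "xd\n"
lemma haha_not_xd (l : String) (h : PySem.Str.endswith l "haha\n" = true) :
    PySem.Str.endswith l "xD\n" = false ∧ PySem.Str.endswith l "xd\n" = false := by
  simp only [PySem.Str.endswith_eq] at h ⊢
  rw [PySem.Chars.endswith_iff] at h
  constructor <;> (rw [Bool.eq_false_iff, Ne, PySem.Chars.endswith_iff]; intro hx) <;>
  · rcases List.suffix_or_suffix_of_suffix hx h with hs | hs <;> revert hs <;> decide

-- loop invariant for A's fold
lemma fold_inv (ls : List String) (st : Int × Int × Int) :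
    ls.foldl countCatStep st =
      (st.1 + (ls.countP (fun l => PySem.Str.endswith l "haha\n") : Int),
       st.2.1 + (ls.countP (fun l => PySem.Str.endswith l "xD\n" || PySem.Str.endswith l "xd\n") : Int),
       st.2.2 + ((ls.length : Int)
         - (ls.countP (fun l => PySem.Str.endswith l "xD\n" || PySem.Str.endswith l "xd\n") : Int)
         - (ls.countP (fun l => PySem.Str.endswith l "haha\n") : Int))) := by
  induction ls generalizing st with
  | nil => simp
  | cons a t ih =>
    rw [List.foldl_cons, ih]
    simp only [countCatStep, List.countP_cons, List.length_cons]
    by_cases hx : (PySem.Str.endswith a "xD\n" || PySem.Str.endswith a "xd\n") = true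
    · have hh : PySem.Str.endswith a "haha\n" = false := by
        by_contra h
        rw [Bool.not_eq_false] at h
        rcases haha_not_xd a h with ⟨h1, h2⟩
        rw [h1, h2] at hx
        simp at hx
      simp only [hx, hh, Bool.false_eq_true, if_true, if_false, Prod.mk.injEq]
      refine ⟨?_, ?_, ?_⟩ <;> push_cast <;> ring
    · rw [Bool.not_eq_true] at hx
      by_cases hh : PySem.Str.endswith a "haha\n" = true
      · simp only [hx, hh, Bool.false_eq_true, if_true, if_false, Prod.mk.injEq]
        refine ⟨?_, ?_, ?_⟩ <;> push_cast <;> ring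
      · rw [Bool.not_eq_true] at hh
        simp only [hx, hh, Bool.false_eq_true, if_false, Prod.mk.injEq]
        refine ⟨?_, ?_, ?_⟩ <;> push_cast <;> ring

-- ===== VERDICT (by name: the statement is the Claim_ definition above) =====
theorem count_categorize_lines_spec : Claim_equal_count_categorize_lines := by
  intro lines _
  unfold Spec_count_categorize_lines count_categorize_lines count_categorize_lines_alt
  rw [fold_inv]
  simp
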